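-- pv_equiv track=rewrite | github.com/achieve00/CodingTest | 프로그래머스/LV1/대충 만든 자판.py | get_min_keymap_positions
-- ===== SOURCE A (Python) =====
-- def get_min_keymap_positions(keymap):
--     key_pos = dict()
--
--     for key in keymap:
--         for idx, ch in enumerate(key):
--             # 타수는 1-based
--             pos = idx + 1
--             if ch not in key_pos:
--                 key_pos[ch] = pos
--             else:
--                 key_pos[ch] = min(key_pos[ch], pos)
--     return key_pos
-- ===== SOURCE B (Python) =====
-- def get_min_keymap_positions(keymap):
--     # Char-major: walk the concatenation once; for each character not answered
--     # yet, compute its minimum 1-based tap position by a full scan over keymap.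
--     result = {}
--     for ch in "".join(keymap):
--         if ch not in result:
--             result[ch] = min(i + 1 for k in keymap for i, c in enumerate(k) if c == ch)
--     return result
-- ===== Notes on version B (the rewrite author's own statement) =====
-- stated objective: alternative
-- what changed: Inverts the loop structure: instead of A's key-major single pass maintaining a running minimum per character in a dict, B iterates characters of the joined keymap and, on each character's first appearance, computes its answer outright as min over all occurrences by a full scan; nothing incremental is maintained.
import Mathlib
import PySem

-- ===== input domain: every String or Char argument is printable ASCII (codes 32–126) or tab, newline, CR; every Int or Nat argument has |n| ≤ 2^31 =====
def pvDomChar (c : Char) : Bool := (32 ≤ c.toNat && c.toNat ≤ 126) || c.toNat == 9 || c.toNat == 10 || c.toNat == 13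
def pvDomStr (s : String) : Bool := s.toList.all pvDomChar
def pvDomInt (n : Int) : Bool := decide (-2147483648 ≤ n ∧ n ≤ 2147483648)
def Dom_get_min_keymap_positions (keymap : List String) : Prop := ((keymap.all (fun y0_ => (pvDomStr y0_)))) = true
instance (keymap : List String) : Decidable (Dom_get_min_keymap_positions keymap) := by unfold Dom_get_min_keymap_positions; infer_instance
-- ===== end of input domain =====

-- B inverts A's loop structure: char-major over the joined keymap, computing each first-seen character's answer outright by a full scan, instead of A's key-major running-minimum dict; alternative decomposition, no speed claim.

-- ===== PORT A =====
-- A: one dict, running minimum updated in place while scanning key-major.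
def get_min_keymap_positions (keymap : List String) : List (String × Int) :=
  (keymap.foldl (fun key_pos key =>
    (PySem.List.enumerate key.toList 0).foldl (fun key_pos p =>
      let ch := String.ofList [p.2]
      let pos := p.1 + 1
      if key_pos.contains ch = false then key_pos.insert ch pos
      else key_pos.insert ch (min (key_pos.getD ch 0) pos)) key_pos)
    PySem.Dict.empty).items

-- ===== PORT B =====
-- Python's min() over the materialised generator 'i + 1 for k in keymap for i, c in enumerate(k) if c == ch'.
-- The [] case (Python: ValueError) is never reached: ch always comes from the join of keymap.
def pyMinGen (ps : List Int) : Int :=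
  match ps with
  | [] => 0
  | x :: xs => xs.foldl min x

-- B: for each character of "".join(keymap), if not answered yet, its answer is
-- min(i + 1 for k in keymap for i, c in enumerate(k) if c == ch), computed by a full scan.
def get_min_keymap_positions_alt (keymap : List String) : List (String × Int) :=
  ((PySem.Str.join "" keymap).toList.foldl (fun result ch =>
    if result.contains (String.ofList [ch]) = false then
      result.insert (String.ofList [ch])
        (pyMinGen (keymap.flatMap (fun k =>
          ((PySem.List.enumerate k.toList 0).filter (fun p => p.2 == ch)).map (fun p => p.1 + 1))))
    else result) PySem.Dict.empty).items

-- ===== PRECONDITION & SPEC =====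
def Spec_get_min_keymap_positions (keymap : List String) (out : List (String × Int)) : Prop := out = get_min_keymap_positions_alt keymap
instance (keymap : List String) (out : List (String × Int)) : Decidable (Spec_get_min_keymap_positions keymap out) := by unfold Spec_get_min_keymap_positions; infer_instance

-- ===== CLAIM (what is proved, stated in full; the proofs are below) =====
def Claim_equal_get_min_keymap_positions : Prop := ∀ (keymap : List String), Dom_get_min_keymap_positions keymap → Spec_get_min_keymap_positions keymap (get_min_keymap_positions keymap)

-- ===== LEMMAS AND PROOFS =====

-- The flattened pair list A effectively scans: all (index, char) pairs, key-major.
def pvPairs (keymap : List String) : List (Int × Char) :=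
  keymap.flatMap (fun k => PySem.List.enumerate k.toList 0)

-- 1-based positions of the character behind string s among the pairs of L.
def pvPosOf (L : List (Int × Char)) (s : String) : List Int :=
  (L.filter (fun q => String.ofList [q.2] == s)).map (fun q => q.1 + 1)

-- B's per-character value (fixed over the whole of B's fold).
def pvBVal (keymap : List String) (ch : Char) : Int :=
  pyMinGen (keymap.flatMap (fun k =>
    ((PySem.List.enumerate k.toList 0).filter (fun p => p.2 == ch)).map (fun p => p.1 + 1)))

def pvStepA (d : PySem.Dict String Int) (p : Int × Char) : PySem.Dict String Int :=
  let ch := String.ofList [p.2]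
  let pos := p.1 + 1
  if d.contains ch = false then d.insert ch pos
  else d.insert ch (min (d.getD ch 0) pos)

def pvStepB (keymap : List String) (d : PySem.Dict String Int) (ch : Char) : PySem.Dict String Int :=
  if d.contains (String.ofList [ch]) = false then
    d.insert (String.ofList [ch]) (pvBVal keymap ch)
  else d

lemma pvOfList_inj {a b : Char} (h : String.ofList [a] = String.ofList [b]) : a = b := by
  have := congrArg String.toList h; simpa using this

lemma pvFoldl_flatMap {α β : Type} (f : α → List (Int × Char)) (g : β → (Int × Char) → β)
    (l : List α) (i : β) :
    (l.flatMap f).foldl g i = l.foldl (fun a x => (f x).foldl g a) i := by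
  induction l generalizing i with
  | nil => rfl
  | cons x xs ih => simp [List.flatMap_cons, List.foldl_append, ih]

lemma pvPosOf_cons_ne (i : Int) (ch : Char) (L : List (Int × Char)) (s : String)
    (h : String.ofList [ch] ≠ s) : pvPosOf ((i, ch) :: L) s = pvPosOf L s := by
  simp [pvPosOf, h]


lemma pvPosOf_cons_self (i : Int) (ch : Char) (L : List (Int × Char)) :
    pvPosOf ((i, ch) :: L) (String.ofList [ch]) = (i + 1) :: pvPosOf L (String.ofList [ch]) := by
  simp [pvPosOf]

lemma pvKeys_eq {dA dB : PySem.Dict String Int} {L : List (Int × Char)}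
    (h1 : dB.items = dA.items.map (fun q => (q.1, (pvPosOf L q.1).foldl min q.2))) :
    dB.keys = dA.keys := by
  show dB.items.map (·.1) = dA.items.map (·.1)
  rw [h1, List.map_map]; rfl

-- Core: A's fold over the remaining pairs equals B's fold over their chars,
-- provided dB already carries the final (global-min) values of dA's keys,
-- and fresh characters' global minimum is determined by the remaining suffix.
lemma pvCore (keymap : List String) (L : List (Int × Char)) (dA dB : PySem.Dict String Int)
    (h1 : dB.items = dA.items.map (fun q => (q.1, (pvPosOf L q.1).foldl min q.2)))
    (h2 : dA.keys.Nodup)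
    (h3 : ∀ p ∈ L, String.ofList [p.2] ∉ dA.keys →
            pvBVal keymap p.2 = pyMinGen (pvPosOf L (String.ofList [p.2]))) :
    (L.foldl pvStepA dA).items = ((L.map Prod.snd).foldl (pvStepB keymap) dB).items := by
  induction L generalizing dA dB with
  | nil =>
    simp only [List.map_nil, List.foldl_nil]
    rw [h1]; symm
    exact (List.map_congr_left fun q _ => by simp [pvPosOf]).trans (List.map_id _)
  | cons hd tl ih =>
    obtain ⟨i, ch⟩ := hd
    have hkeys := pvKeys_eq h1
    by_cases hc : dA.contains (String.ofList [ch]) = true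
    · -- existing key: A replaces in place with the running min, B skips.
      have hcB : dB.contains (String.ofList [ch]) = true := by
        rw [PySem.Dict.contains_eq_decide_mem_keys, hkeys,
          ← PySem.Dict.contains_eq_decide_mem_keys]; exact hc
      have hsmem : String.ofList [ch] ∈ dA.keys := by
        simpa [PySem.Dict.contains_eq_decide_mem_keys] using hc
      simp only [List.foldl_cons, List.map_cons]
      have hA : pvStepA dA (i, ch) =
          dA.insert (String.ofList [ch]) (min (dA.getD (String.ofList [ch]) 0) (i + 1)) := by
        simp [pvStepA, hc]
      have hB : pvStepB keymap dB ch = dB := by simp [pvStepB, hcB]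
      rw [hA, hB]
      refine ih _ _ ?_ ?_ ?_
      · rw [PySem.Dict.items_insert_of_contains _ _ hc, h1, List.map_map]
        refine List.map_congr_left fun q hq => ?_
        by_cases hqs : q.1 = String.ofList [ch]
        · have hbeq : (q.1 == String.ofList [ch]) = true := by simp [hqs]
          have hdq : dA.getD q.1 0 = q.2 := PySem.Dict.getD_of_mem_items dA (by simpa using hq) h2 0
          simp only [Function.comp_apply, hbeq, if_pos]
          rw [← hqs, hdq, hqs, pvPosOf_cons_self]
          simp [List.foldl_cons]
        · have hbeq : (q.1 == String.ofList [ch]) = false := by simp [hqs]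
          simp only [Function.comp_apply, hbeq, if_neg, Bool.false_eq_true, not_false_iff]
          rw [pvPosOf_cons_ne _ _ _ _ (fun h => hqs h.symm)]
      · rw [PySem.Dict.keys_insert_of_contains _ _ hc]; exact h2
      · intro p hp hnp
        rw [PySem.Dict.keys_insert_of_contains _ _ hc] at hnp
        have hne : String.ofList [ch] ≠ String.ofList [p.2] := fun h => hnp (h ▸ hsmem)
        rw [← pvPosOf_cons_ne i ch tl _ hne]
        exact h3 p (List.mem_cons_of_mem _ hp) hnp
    · -- fresh key: A inserts the current position, B inserts the precomputed global min.
      have hc' : dA.contains (String.ofList [ch]) = false := by simpa using hc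
      have hcB : dB.contains (String.ofList [ch]) = false := by
        rw [PySem.Dict.contains_eq_decide_mem_keys, hkeys,
          ← PySem.Dict.contains_eq_decide_mem_keys]; exact hc'
      have hsnm : String.ofList [ch] ∉ dA.keys := by
        simpa [PySem.Dict.contains_eq_decide_mem_keys] using hc'
      simp only [List.foldl_cons, List.map_cons]
      have hA : pvStepA dA (i, ch) = dA.insert (String.ofList [ch]) (i + 1) := by
        simp [pvStepA, hc']
      have hB : pvStepB keymap dB ch = dB.insert (String.ofList [ch]) (pvBVal keymap ch) := by
        simp [pvStepB, hcB]
      rw [hA, hB]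
      refine ih _ _ ?_ ?_ ?_
      · rw [PySem.Dict.items_insert_of_not_contains _ _ hcB,
          PySem.Dict.items_insert_of_not_contains _ _ hc', h1, List.map_append]
        congr 1
        · refine List.map_congr_left fun q hq => ?_
          have hqs : q.1 ≠ String.ofList [ch] := fun h =>
            hsnm (h ▸ PySem.Dict.mem_keys_of_mem_items _ hq)
          rw [pvPosOf_cons_ne _ _ _ _ (fun h => hqs h.symm)]
        · have hv := h3 (i, ch) (List.mem_cons_self) hsnm
          rw [pvPosOf_cons_self] at hv
          simp only [List.map_cons, List.map_nil]
          rw [hv]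
          simp [pyMinGen]
      · rw [PySem.Dict.keys_insert_of_not_contains _ _ hc']
        exact List.Nodup.append h2 (List.nodup_singleton _)
          (by simpa [List.disjoint_singleton] using hsnm)
      · intro p hp hnp
        rw [PySem.Dict.keys_insert_of_not_contains _ _ hc'] at hnp
        simp only [List.mem_append, List.mem_singleton, not_or] at hnp
        obtain ⟨hnp1, hnp2⟩ := hnp
        rw [← pvPosOf_cons_ne i ch tl _ (fun h => hnp2 h.symm)]
        exact h3 p (List.mem_cons_of_mem _ hp) hnp1

-- B's per-character value IS the min over all positions of that char in the pair list.
lemma pvBVal_eq (keymap : List String) (ch : Char) :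
    pvBVal keymap ch = pyMinGen (pvPosOf (pvPairs keymap) (String.ofList [ch])) := by
  unfold pvBVal pvPairs pvPosOf
  rw [List.filter_flatMap, List.map_flatMap]
  congr 1
  refine congrArg (fun f => List.flatMap f keymap) (funext fun k => ?_)
  congr 1
  refine List.filter_congr fun q _ => ?_
  by_cases h : q.2 = ch
  · simp [h]
  · have hne : String.ofList [q.2] ≠ String.ofList [ch] := fun he => h (pvOfList_inj he)
    simp [h, hne]

-- Joining with the empty separator concatenates.
lemma pvJoinNil (css : List (List Char)) : PySem.Chars.join [] css = css.flatten := by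
  induction css with
  | nil => simp [PySem.Chars.join_nil]
  | cons c cs ih =>
    cases cs with
    | nil => simp [PySem.Chars.join_singleton]
    | cons c2 cs' => rw [PySem.Chars.join_cons_cons]; simp [ih]

-- The characters of "".join(keymap), in order, are the chars of the pair list.
lemma pvJoin_eq (keymap : List String) :
    (PySem.Str.join "" keymap).toList = (pvPairs keymap).map Prod.snd := by
  rw [pvPairs, List.map_flatMap]
  have h2 : ∀ k : String, (PySem.List.enumerate k.toList 0).map Prod.snd = k.toList := by
    intro k; exact PySem.List.map_snd_enumerate _ _
  simp only [h2]
  rw [PySem.Str.toList_join]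
  have hsep : ("" : String).toList = [] := rfl
  rw [hsep, pvJoinNil]
  simp [List.flatMap_def]

-- ===== VERDICT (by name: the statement is the Claim_ definition above) =====
theorem get_min_keymap_positions_spec : Claim_equal_get_min_keymap_positions := by
  intro keymap _
  show get_min_keymap_positions keymap = get_min_keymap_positions_alt keymap
  unfold get_min_keymap_positions get_min_keymap_positions_alt
  have hA : (keymap.foldl (fun key_pos key =>
      (PySem.List.enumerate key.toList 0).foldl (fun key_pos p =>
        let ch := String.ofList [p.2]
        let pos := p.1 + 1
        if key_pos.contains ch = false then key_pos.insert ch pos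
        else key_pos.insert ch (min (key_pos.getD ch 0) pos)) key_pos) PySem.Dict.empty) =
      ((pvPairs keymap).foldl pvStepA PySem.Dict.empty) := by
    rw [pvPairs, pvFoldl_flatMap]; rfl
  have hB : ((PySem.Str.join "" keymap).toList.foldl (fun result ch =>
      if result.contains (String.ofList [ch]) = false then
        result.insert (String.ofList [ch])
          (pyMinGen (keymap.flatMap (fun k =>
            ((PySem.List.enumerate k.toList 0).filter (fun p => p.2 == ch)).map (fun p => p.1 + 1))))
      else result) PySem.Dict.empty) =
      (((pvPairs keymap).map Prod.snd).foldl (pvStepB keymap) PySem.Dict.empty) := by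
    rw [pvJoin_eq]; rfl
  rw [hA, hB]
  refine pvCore keymap (pvPairs keymap) PySem.Dict.empty PySem.Dict.empty ?_ ?_ ?_
  · rfl
  · exact PySem.Dict.nodup_keys_empty
  · intro p _ _; exact pvBVal_eq keymap p.2
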